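-- pv_equiv track=rewrite | github.com/project-terraforma/pro_rice_open_closed_prediction | src/models_v2/run_lr_ablation.py | _ablation_columns
-- ===== SOURCE A (Python) =====
-- def _ablation_columns(all_cols: list[str], config: str) -> list[str]:
--     def is_geo_ohe(col: str) -> bool:
--         return col.startswith("ohe_geo_cluster__")
--
--     drop = set()
--     if config in {"no_raw_geo_ids", "core_no_geo_priors"}:
--         drop.update({"geo_cluster_id", "geo_h3_cell_id"})
--
--     if config == "core_no_geo_priors":
--         drop.update(
--             {
--                 "category_closure_risk",
--                 "spatial_cluster_closed_rate",
--                 "spatial_local_density",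
--                 "same_category_neighbor_closed_rate",
--                 "neighbor_closed_rate",
--             }
--         )
--         drop.update({c for c in all_cols if is_geo_ohe(c)})
--
--     selected = [c for c in all_cols if c not in drop]
--     if not selected:
--         raise ValueError(f"Ablation '{config}' selected zero columns")
--     return selected
-- ===== SOURCE B (Python) =====
-- def _ablation_columns(all_cols: list[str], config: str) -> list[str]:
--     # Staged removal: collect the applicable drop rules, then apply each rule
--     # as its own filtering pass over the surviving list (no drop set is built).
--     rules = []
--     if config in ("no_raw_geo_ids", "core_no_geo_priors"):
--         rules.append(lambda c: c in ("geo_cluster_id", "geo_h3_cell_id"))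
--     if config == "core_no_geo_priors":
--         rules.append(lambda c: c in (
--             "category_closure_risk",
--             "spatial_cluster_closed_rate",
--             "spatial_local_density",
--             "same_category_neighbor_closed_rate",
--             "neighbor_closed_rate",
--         ))
--         rules.append(lambda c: c.startswith("ohe_geo_cluster__"))
--
--     selected = list(all_cols)
--     for drop_rule in rules:
--         selected = [c for c in selected if not drop_rule(c)]
--
--     if not selected:
--         raise ValueError(f"Ablation '{config}' selected zero columns")
--     return selected
-- ===== Notes on version B (the rewrite author's own statement) =====
-- stated objective: alternative
-- what changed: B replaces A's build-a-mutable-drop-set-then-filter (including the extra comprehension scanning all_cols for geo-OHE columns) with a staged pipeline: it collects the applicable drop rules as a list of predicates and applies each rule as its own filtering pass over the shrinking list, maintaining no drop set; the identical ValueError is raised when nothing survives.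
import Mathlib
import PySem

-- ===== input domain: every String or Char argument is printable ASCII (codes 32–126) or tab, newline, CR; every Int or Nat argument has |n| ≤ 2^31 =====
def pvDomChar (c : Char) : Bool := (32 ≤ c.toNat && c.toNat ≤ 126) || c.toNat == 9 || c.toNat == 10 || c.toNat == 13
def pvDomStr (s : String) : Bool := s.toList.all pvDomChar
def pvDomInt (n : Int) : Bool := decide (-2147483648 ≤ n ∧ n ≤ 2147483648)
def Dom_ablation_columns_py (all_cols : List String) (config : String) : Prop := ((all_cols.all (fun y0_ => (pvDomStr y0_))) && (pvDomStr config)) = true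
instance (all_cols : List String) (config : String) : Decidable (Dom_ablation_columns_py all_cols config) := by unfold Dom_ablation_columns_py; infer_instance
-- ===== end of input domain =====

-- B replaces A's build-drop-set-then-filter with a staged pipeline: a list of drop-rule
-- predicates is collected for the config and each rule is applied as its own filtering pass
-- over the shrinking list (alternative decomposition; same cost).

-- ===== PORT A =====
def pyIsGeoOhe (col : String) : Bool := PySem.Str.startswith col "ohe_geo_cluster__"

def ablation_columns_py (all_cols : List String) (config : String) : List String :=
  let drop : PySem.Set String := PySem.Set.empty
  let drop := if config = "no_raw_geo_ids" ∨ config = "core_no_geo_priors" then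
      PySem.Set.update drop ["geo_cluster_id", "geo_h3_cell_id"]
    else drop
  let drop := if config = "core_no_geo_priors" then
      PySem.Set.update
        (PySem.Set.update drop
          ["category_closure_risk", "spatial_cluster_closed_rate", "spatial_local_density",
           "same_category_neighbor_closed_rate", "neighbor_closed_rate"])
        (PySem.Set.ofList (all_cols.filter pyIsGeoOhe))
    else drop
  all_cols.filter (fun c => !(PySem.Set.contains drop c))

-- ===== PORT B =====
def ablation_columns_py_alt (all_cols : List String) (config : String) : List String :=
  let rules : List (String → Bool) :=
    (if config = "no_raw_geo_ids" ∨ config = "core_no_geo_priors" then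
        [fun c => c = "geo_cluster_id" || c = "geo_h3_cell_id"]
      else [])
    ++ (if config = "core_no_geo_priors" then
        [fun c => c = "category_closure_risk" || c = "spatial_cluster_closed_rate"
                || c = "spatial_local_density" || c = "same_category_neighbor_closed_rate"
                || c = "neighbor_closed_rate",
         fun c => PySem.Str.startswith c "ohe_geo_cluster__"]
      else [])
  rules.foldl (fun sel r => sel.filter (fun c => !(r c))) all_cols

-- ===== PRECONDITION & SPEC =====
-- Pre_ excludes exactly the inputs where A raises ValueError (zero columns selected); B raises there too.
def pvKeep (config c : String) : Bool :=
  if config = "core_no_geo_priors" then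
    !(c = "geo_cluster_id" || c = "geo_h3_cell_id"
      || c = "category_closure_risk" || c = "spatial_cluster_closed_rate"
      || c = "spatial_local_density" || c = "same_category_neighbor_closed_rate"
      || c = "neighbor_closed_rate" || PySem.Str.startswith c "ohe_geo_cluster__")
  else if config = "no_raw_geo_ids" then
    !(c = "geo_cluster_id" || c = "geo_h3_cell_id")
  else
    true

def Pre_ablation_columns_py (all_cols : List String) (config : String) : Prop :=
  all_cols.any (pvKeep config) = true
instance (all_cols : List String) (config : String) : Decidable (Pre_ablation_columns_py all_cols config) := by unfold Pre_ablation_columns_py; infer_instance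

def pvWitness_ablation_columns_py : List String × String :=
  (["foo", "geo_cluster_id"], "no_raw_geo_ids")

def Spec_ablation_columns_py (all_cols : List String) (config : String) (out : List String) : Prop := out = ablation_columns_py_alt all_cols config
instance (all_cols : List String) (config : String) (out : List String) : Decidable (Spec_ablation_columns_py all_cols config out) := by unfold Spec_ablation_columns_py; infer_instance

-- ===== CLAIM (what is proved, stated in full; the proofs are below) =====
def Claim_equal_ablation_columns_py : Prop := ∀ (all_cols : List String) (config : String), Dom_ablation_columns_py all_cols config → Pre_ablation_columns_py all_cols config → Spec_ablation_columns_py all_cols config (ablation_columns_py all_cols config)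

-- ===== LEMMAS AND PROOFS =====

theorem ablation_filter_eq (all_cols : List String) (config : String) :
    ablation_columns_py all_cols config = ablation_columns_py_alt all_cols config := by
  unfold ablation_columns_py ablation_columns_py_alt
  by_cases h1 : config = "core_no_geo_priors"
  · subst h1
    simp only [String.reduceEq, or_true, reduceIte, List.foldl,
      List.cons_append, List.nil_append, List.filter_filter]
    apply List.filter_congr
    intro c hc
    simp [pyIsGeoOhe, PySem.Set.contains, PySem.Set.mem_update, PySem.Set.mem_ofList, hc,
      Bool.and_assoc, Bool.and_comm, Bool.and_left_comm]
  · by_cases h2 : config = "no_raw_geo_ids"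
    · subst h2
      simp only [String.reduceEq, or_false, reduceIte, List.foldl,
        List.cons_append, List.nil_append]
      apply List.filter_congr
      intro c hc
      simp [PySem.Set.contains, PySem.Set.empty]
    · simp [h1, h2, PySem.Set.contains, PySem.Set.empty]

-- ===== VERDICT (by name: the statement is the Claim_ definition above) =====
theorem ablation_columns_py_spec : Claim_equal_ablation_columns_py := by
  intro all_cols config _ _
  unfold Spec_ablation_columns_py
  exact ablation_filter_eq all_cols config
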